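-- pv_equiv track=rewrite | github.com/betovildoza/Architect_compass | architect_symbols.py | _split_php_args
-- ===== SOURCE A (Python) =====
-- from typing import Any, Dict, Iterable, List, Optional, Tuple
--
-- def _split_php_args(raw: str) -> List[str]:
--     raw = raw.strip()
--     if not raw:
--         return []
--     out: List[str] = []
--     depth = 0
--     buf = ""
--     for ch in raw:
--         if ch in "([{":
--             depth += 1
--             buf += ch
--         elif ch in ")]}":
--             depth -= 1
--             buf += ch
--         elif ch == "," and depth == 0:
--             out.append(buf.strip())
--             buf = ""
--         else:
--             buf += ch
--     if buf.strip():
--         out.append(buf.strip())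
--     cleaned: List[str] = []
--     for a in out:
--         a = a.split("=", 1)[0].strip()
--         # Remover type hints: `Foo $bar` → `$bar`; `?Foo $bar` → `$bar`.
--         parts = a.rsplit(" ", 1)
--         if len(parts) == 2 and parts[1].startswith("$"):
--             a = parts[1]
--         if a:
--             cleaned.append(a.lstrip("&"))
--     return cleaned
-- ===== SOURCE B (Python) =====
-- from typing import Any, Dict, Iterable, List, Optional, Tuple
--
--
-- def _clean_arg(seg: str) -> Optional[str]:
--     a = seg.split("=", 1)[0].strip()
--     parts = a.rsplit(" ", 1)
--     if len(parts) == 2 and parts[1].startswith("$"):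
--         a = parts[1]
--     return a.lstrip("&") if a else None
--
--
-- def _split_php_args(raw: str) -> List[str]:
--     raw = raw.strip()
--     depth = 0
--     cuts = [-1]
--     for i, ch in enumerate(raw):
--         if ch in "([{":
--             depth += 1
--         elif ch in ")]}":
--             depth -= 1
--         elif ch == "," and depth == 0:
--             cuts.append(i)
--     cuts.append(len(raw))
--     segs = [raw[lo + 1:hi].strip() for lo, hi in zip(cuts, cuts[1:])]
--     return [c for c in map(_clean_arg, segs) if c is not None]
-- ===== Notes on version B (the rewrite author's own statement) =====
-- stated objective: alternative
-- what changed: B records the indices of top-level commas in one scan and slices the argument segments out of the string, instead of A's character-by-character buffer accumulation; cleaning becomes a filter-map over the segments instead of an accumulator loop.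
import Mathlib
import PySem

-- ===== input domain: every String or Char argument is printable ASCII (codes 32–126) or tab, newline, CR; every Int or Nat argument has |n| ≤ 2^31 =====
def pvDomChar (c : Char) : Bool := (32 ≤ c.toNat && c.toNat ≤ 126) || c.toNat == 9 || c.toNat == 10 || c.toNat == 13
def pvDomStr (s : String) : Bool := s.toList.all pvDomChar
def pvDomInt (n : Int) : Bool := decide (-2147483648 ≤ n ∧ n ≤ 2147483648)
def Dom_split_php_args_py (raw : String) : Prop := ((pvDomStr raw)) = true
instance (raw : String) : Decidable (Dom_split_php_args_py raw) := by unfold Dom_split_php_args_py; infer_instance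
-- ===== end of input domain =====

-- B finds the top-level comma positions first and slices the segments out, instead of A's
-- character-by-character buffer accumulation (objective: alternative decomposition, same cost).

-- shared character-class helpers (port of `ch in "([{"` / `ch in ")]}"`)
def pvOpen (c : Char) : Bool := c == '(' || c == '[' || c == '{'
def pvClose (c : Char) : Bool := c == ')' || c == ']' || c == '}'

-- hand port of `a.rsplit(" ", 1)` (PySem has no rsplit): split at the last space, at most once; exact
def pvRsplitSp (a : List Char) : List (List Char) :=
  match a.reverse.findIdx? (· == ' ') with
  | none => [a]
  | some r => [a.take (a.length - 1 - r), a.drop (a.length - r)]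

-- ===== PORT A =====
def pvStepA (s : List (List Char) × Int × List Char) (ch : Char) : List (List Char) × Int × List Char :=
  if pvOpen ch then (s.1, s.2.1 + 1, s.2.2 ++ [ch])
  else if pvClose ch then (s.1, s.2.1 - 1, s.2.2 ++ [ch])
  else if ch == ',' && s.2.1 == 0 then (s.1 ++ [PySem.Chars.strip s.2.2], s.2.1, [])
  else (s.1, s.2.1, s.2.2 ++ [ch])

-- body of A's cleaning loop (`.lstrip("&")` hand-ported as dropWhile (· == '&'); exact)
def pvCleanStepA (acc : List (List Char)) (a0 : List Char) : List (List Char) :=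
  let a1 := PySem.Chars.strip ((PySem.Chars.splitOnMax a0 ['='] 1).headD [])
  let parts := pvRsplitSp a1
  let a2 := if parts.length == 2 && PySem.Chars.startswith (parts.getD 1 []) ['$'] then parts.getD 1 [] else a1
  if a2 ≠ [] then acc ++ [a2.dropWhile (· == '&')] else acc

def split_php_args_py (raw : String) : List String :=
  let rawl := PySem.Chars.strip raw.toList
  if rawl = [] then []
  else
    let st := rawl.foldl pvStepA ([], 0, [])
    let out := if PySem.Chars.strip st.2.2 ≠ [] then st.1 ++ [PySem.Chars.strip st.2.2] else st.1
    (out.foldl pvCleanStepA []).map (fun l => String.ofList l)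

-- ===== PORT B =====
-- B's _clean_arg (same hand ports of rsplit / lstrip("&") as above; exact)
def pvClean (seg : List Char) : Option (List Char) :=
  let a1 := PySem.Chars.strip ((PySem.Chars.splitOnMax seg ['='] 1).headD [])
  let parts := pvRsplitSp a1
  let a2 := if parts.length == 2 && PySem.Chars.startswith (parts.getD 1 []) ['$'] then parts.getD 1 [] else a1
  if a2 ≠ [] then some (a2.dropWhile (· == '&')) else none

def pvStepB (s : Int × List Int) (p : Int × Char) : Int × List Int :=
  if pvOpen p.2 then (s.1 + 1, s.2)
  else if pvClose p.2 then (s.1 - 1, s.2)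
  else if p.2 == ',' && s.1 == 0 then (s.1, s.2 ++ [p.1])
  else (s.1, s.2)

def split_php_args_py_alt (raw : String) : List String :=
  let rawl := PySem.Chars.strip raw.toList
  let st := (PySem.List.enumerate rawl).foldl pvStepB (0, [-1])
  let cuts := st.2 ++ [(rawl.length : Int)]
  let segs := (cuts.zip cuts.tail).map
    (fun lh => PySem.Chars.strip (PySem.List.slice rawl (some (lh.1 + 1)) (some lh.2)))
  (segs.filterMap pvClean).map (fun l => String.ofList l)

-- ===== PRECONDITION & SPEC =====
def Spec_split_php_args_py (raw : String) (out : List String) : Prop := out = split_php_args_py_alt raw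
instance (raw : String) (out : List String) : Decidable (Spec_split_php_args_py raw out) := by unfold Spec_split_php_args_py; infer_instance

-- ===== CLAIM (what is proved, stated in full; the proofs are below) =====
def Claim_equal_split_php_args_py : Prop := ∀ (raw : String), Dom_split_php_args_py raw → Spec_split_php_args_py raw (split_php_args_py raw)

-- ===== LEMMAS AND PROOFS =====

-- reference segmentation: the raw top-level-comma segments of a string, as a recursion
def pvSegs (d : Int) : List Char → List (List Char)
  | [] => [[]]
  | c :: cs =>
    if pvOpen c then (pvSegs (d+1) cs).modifyHead (c :: ·)
    else if pvClose c then (pvSegs (d-1) cs).modifyHead (c :: ·)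
    else if c == ',' && d == 0 then [] :: pvSegs d cs
    else (pvSegs d cs).modifyHead (c :: ·)

-- reference comma positions (absolute indices, counting from k)
def pvCommas (d : Int) (k : Nat) : List Char → List Nat
  | [] => []
  | c :: cs =>
    if pvOpen c then pvCommas (d+1) (k+1) cs
    else if pvClose c then pvCommas (d-1) (k+1) cs
    else if c == ',' && d == 0 then k :: pvCommas d (k+1) cs
    else pvCommas d (k+1) cs

theorem pvSegs_ne_nil (d : Int) (cs : List Char) : pvSegs d cs ≠ [] := by
  induction cs generalizing d with
  | nil => simp [pvSegs]
  | cons c cs ih =>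
    unfold pvSegs
    split
    · simpa using ih (d+1)
    · split
      · simpa using ih (d-1)
      · split
        · simp
        · simpa using ih d

theorem pvModifyHead_append_cons (buf : List Char) (c : Char) (l : List (List Char)) :
    (l.modifyHead (c :: ·)).modifyHead (buf ++ ·) = l.modifyHead ((buf ++ [c]) ++ ·) := by
  rw [List.modifyHead_modifyHead]; congr 1; funext x; simp

theorem pvGetLastD_irrel (l : List (List Char)) (h : l ≠ []) (d d' : List Char) :
    l.getLastD d = l.getLastD d' := by
  cases hx : l.getLast? with
  | none => exact absurd (List.getLast?_eq_none_iff.mp hx) h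
  | some x => simp [List.getLastD_eq_getLast?, hx]

theorem pvFoldA (cs : List Char) : ∀ (out : List (List Char)) (d : Int) (buf : List Char),
    (cs.foldl pvStepA (out, d, buf)).1
      = out ++ (((pvSegs d cs).modifyHead (buf ++ ·)).dropLast).map PySem.Chars.strip
    ∧ (cs.foldl pvStepA (out, d, buf)).2.2 = ((pvSegs d cs).modifyHead (buf ++ ·)).getLastD [] := by
  induction cs with
  | nil => intro out d buf; simp [pvSegs]
  | cons c cs ih =>
    intro out d buf
    rw [List.foldl_cons]
    by_cases h1 : pvOpen c = true
    · have e1 : pvStepA (out, d, buf) c = (out, d + 1, buf ++ [c]) := by simp [pvStepA, h1]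
      have e2 : pvSegs d (c :: cs) = (pvSegs (d+1) cs).modifyHead (c :: ·) := by simp [pvSegs, h1]
      rw [e1, e2, pvModifyHead_append_cons]
      exact ih out (d+1) (buf ++ [c])
    · by_cases h2 : pvClose c = true
      · have e1 : pvStepA (out, d, buf) c = (out, d - 1, buf ++ [c]) := by simp [pvStepA, h1, h2]
        have e2 : pvSegs d (c :: cs) = (pvSegs (d-1) cs).modifyHead (c :: ·) := by simp [pvSegs, h1, h2]
        rw [e1, e2, pvModifyHead_append_cons]
        exact ih out (d-1) (buf ++ [c])
      · by_cases h3 : (c == ',' && d == 0) = true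
        · have e1 : pvStepA (out, d, buf) c = (out ++ [PySem.Chars.strip buf], d, []) := by
            simp [pvStepA, h1, h2, h3]
          have e2 : pvSegs d (c :: cs) = [] :: pvSegs d cs := by simp [pvSegs, h1, h2, h3]
          have hS := pvSegs_ne_nil d cs
          have hmod : (pvSegs d cs).modifyHead (fun x => [] ++ x) = pvSegs d cs := by cases pvSegs d cs <;> simp
          obtain ⟨hi1, hi2⟩ := ih (out ++ [PySem.Chars.strip buf]) d []
          rw [hmod] at hi1 hi2
          rw [e1, e2]
          constructor
          · rw [hi1]
            have : ((([] : List Char) :: pvSegs d cs).modifyHead (buf ++ ·)) = buf :: pvSegs d cs := by simp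
            rw [this, List.dropLast_cons_of_ne_nil hS]
            simp
          · rw [hi2]
            have : ((([] : List Char) :: pvSegs d cs).modifyHead (buf ++ ·)) = buf :: pvSegs d cs := by simp
            rw [this, List.getLastD_cons]
            exact pvGetLastD_irrel _ hS [] buf
        · have e1 : pvStepA (out, d, buf) c = (out, d, buf ++ [c]) := by simp [pvStepA, h1, h2, h3]
          have e2 : pvSegs d (c :: cs) = (pvSegs d cs).modifyHead (c :: ·) := by simp [pvSegs, h1, h2, h3]
          rw [e1, e2, pvModifyHead_append_cons]
          exact ih out d (buf ++ [c])

theorem pvCleanStepA_eq (acc : List (List Char)) (x : List Char) :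
    pvCleanStepA acc x = acc ++ (pvClean x).toList := by
  unfold pvCleanStepA pvClean
  dsimp only
  split <;> split <;> simp

theorem pvCleanFold (l : List (List Char)) : ∀ acc, l.foldl pvCleanStepA acc = acc ++ l.filterMap pvClean := by
  induction l with
  | nil => simp
  | cons x l ih =>
    intro acc
    rw [List.foldl_cons, pvCleanStepA_eq, ih, List.filterMap_cons]
    cases pvClean x <;> simp

theorem pvFoldB (cs : List Char) : ∀ (k : Nat) (d : Int) (acc : List Int),
    ((PySem.List.enumerate cs (k : Int)).foldl pvStepB (d, acc)).2
      = acc ++ (pvCommas d k cs).map (Nat.cast : Nat → Int) := by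
  induction cs with
  | nil => intro k d acc; simp [PySem.List.enumerate_nil, pvCommas]
  | cons c cs ih =>
    intro k d acc
    rw [PySem.List.enumerate_cons, List.foldl_cons]
    have hk1 : (k : Int) + 1 = ((k + 1 : Nat) : Int) := by push_cast; ring
    by_cases h1 : pvOpen c = true
    · have e1 : pvStepB (d, acc) ((k : Int), c) = (d+1, acc) := by simp [pvStepB, h1]
      have e2 : pvCommas d k (c :: cs) = pvCommas (d+1) (k+1) cs := by simp [pvCommas, h1]
      rw [e1, e2, hk1]; exact ih (k+1) (d+1) acc
    · by_cases h2 : pvClose c = true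
      · have e1 : pvStepB (d, acc) ((k : Int), c) = (d-1, acc) := by simp [pvStepB, h1, h2]
        have e2 : pvCommas d k (c :: cs) = pvCommas (d-1) (k+1) cs := by simp [pvCommas, h1, h2]
        rw [e1, e2, hk1]; exact ih (k+1) (d-1) acc
      · by_cases h3 : (c == ',' && d == 0) = true
        · have e1 : pvStepB (d, acc) ((k : Int), c) = (d, acc ++ [(k : Int)]) := by
            simp [pvStepB, h1, h2, h3]
          have e2 : pvCommas d k (c :: cs) = k :: pvCommas d (k+1) cs := by simp [pvCommas, h1, h2, h3]
          rw [e1, e2, hk1, ih (k+1) d (acc ++ [(k : Int)])]; simp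
        · have e1 : pvStepB (d, acc) ((k : Int), c) = (d, acc) := by simp [pvStepB, h1, h2, h3]
          have e2 : pvCommas d k (c :: cs) = pvCommas d (k+1) cs := by simp [pvCommas, h1, h2, h3]
          rw [e1, e2, hk1]; exact ih (k+1) d acc

theorem pvCommas_bound (cs : List Char) : ∀ (d : Int) (k : Nat), ∀ i ∈ pvCommas d k cs, k ≤ i ∧ i < k + cs.length := by
  induction cs with
  | nil => intro d k i hi; simp [pvCommas] at hi
  | cons c cs ih =>
    intro d k i hi
    unfold pvCommas at hi
    split at hi
    · have := ih (d+1) (k+1) i hi; simp; omega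
    · split at hi
      · have := ih (d-1) (k+1) i hi; simp; omega
      · split at hi
        · rcases List.mem_cons.mp hi with h | h
          · subst h; simp
          · have := ih d (k+1) i h; simp; omega
        · have := ih d (k+1) i hi; simp; omega

theorem pvSliceCons (full : List Char) (k m : Nat) (c : Char) (cs : List Char)
    (hd : full.drop k = c :: cs) (hlt : k < m) :
    PySem.List.slice full (some (k : Int)) (some (m : Int))
      = c :: PySem.List.slice full (some ((k + 1 : Nat) : Int)) (some (m : Int)) := by
  rw [PySem.List.slice_natCast, PySem.List.slice_natCast]
  have hd1 : full.drop (k+1) = cs := by rw [← List.tail_drop, hd]; rfl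
  rw [hd, hd1]
  have e : m - k = (m - (k+1)) + 1 := by omega
  rw [e, List.take_succ_cons]

theorem pvSlices (full : List Char) (cs : List Char) : ∀ (k : Nat) (d : Int), full.drop k = cs →
    (((((k : Int) - 1) :: (pvCommas d k cs).map (Nat.cast : Nat → Int)) ++ [(full.length : Int)]).zip
      (((pvCommas d k cs).map (Nat.cast : Nat → Int)) ++ [(full.length : Int)])).map
        (fun lh => PySem.List.slice full (some (lh.1 + 1)) (some lh.2))
      = pvSegs d cs := by
  induction cs with
  | nil =>
    intro k d h
    have e : (k : Int) - 1 + 1 = ((k : Nat) : Int) := by ring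
    simp [pvCommas, pvSegs, e, PySem.List.slice_natCast, h]
  | cons c cs ih =>
    intro k d h
    have hk : k < full.length := by
      have hlen := congrArg List.length h
      rw [List.length_drop] at hlen
      simp at hlen
      omega
    have hd1 : full.drop (k+1) = cs := by rw [← List.tail_drop, h]; rfl
    have ecast : ((k + 1 : Nat) : Int) - 1 = (k : Int) := by push_cast; ring
    have key : ∀ d' : Int, pvCommas d k (c :: cs) = pvCommas d' (k+1) cs →
        pvSegs d (c :: cs) = (pvSegs d' cs).modifyHead (c :: ·) →
        (((((k : Int) - 1) :: (pvCommas d k (c :: cs)).map (Nat.cast : Nat → Int)) ++ [(full.length : Int)]).zip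
          (((pvCommas d k (c :: cs)).map (Nat.cast : Nat → Int)) ++ [(full.length : Int)])).map
            (fun lh => PySem.List.slice full (some (lh.1 + 1)) (some lh.2))
          = pvSegs d (c :: cs) := by
      intro d' hc hs
      rw [hc, hs]
      obtain ⟨h0, L', hL⟩ : ∃ h0 L',
          (pvCommas d' (k+1) cs).map (Nat.cast : Nat → Int) ++ [(full.length : Int)] = h0 :: L' := by
        cases (pvCommas d' (k+1) cs).map (Nat.cast : Nat → Int) with
        | nil => exact ⟨_, _, rfl⟩
        | cons a t => exact ⟨a, t ++ [(full.length : Int)], by simp⟩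
      obtain ⟨m, hm, hkm⟩ : ∃ m : Nat, h0 = (m : Int) ∧ k < m := by
        have hmem : h0 ∈ (pvCommas d' (k+1) cs).map (Nat.cast : Nat → Int) ++ [(full.length : Int)] := by
          rw [hL]; exact List.mem_cons_self
        rcases List.mem_append.mp hmem with hm | hm
        · obtain ⟨i, hiI, rfl⟩ := List.mem_map.mp hm
          exact ⟨i, rfl, by have := pvCommas_bound cs d' (k+1) i hiI; omega⟩
        · exact ⟨full.length, by simpa using hm, hk⟩
      have hIH := ih (k+1) d' hd1
      rw [List.cons_append, hL, ecast, List.zip_cons_cons, List.map_cons] at hIH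
      rw [List.cons_append, hL, List.zip_cons_cons, List.map_cons, ← hIH, List.modifyHead_cons]
      congr 1
      subst hm
      have e1 : (k : Int) - 1 + 1 = ((k : Nat) : Int) := by ring
      have e2 : (k : Int) + 1 = ((k + 1 : Nat) : Int) := by push_cast; ring
      dsimp only
      rw [e1, e2]
      exact pvSliceCons full k m c cs h hkm
    by_cases h1 : pvOpen c = true
    · exact key (d+1) (by simp [pvCommas, h1]) (by simp [pvSegs, h1])
    · by_cases h2 : pvClose c = true
      · exact key (d-1) (by simp [pvCommas, h1, h2]) (by simp [pvSegs, h1, h2])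
      · by_cases h3 : (c == ',' && d == 0) = true
        · have hc : pvCommas d k (c :: cs) = k :: pvCommas d (k+1) cs := by simp [pvCommas, h1, h2, h3]
          have hs : pvSegs d (c :: cs) = [] :: pvSegs d cs := by simp [pvSegs, h1, h2, h3]
          rw [hc, hs]
          have hIH := ih (k+1) d hd1
          rw [List.cons_append, ecast] at hIH
          rw [List.map_cons, List.cons_append, List.cons_append, List.zip_cons_cons, List.map_cons, hIH]
          congr 1
          have e1 : (k : Int) - 1 + 1 = ((k : Nat) : Int) := by ring
          dsimp only
          rw [e1, PySem.List.slice_natCast]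
          simp
        · exact key d (by simp [pvCommas, h1, h2, h3]) (by simp [pvSegs, h1, h2, h3])

theorem pvAlt (raw : String) :
    split_php_args_py_alt raw
      = ((((pvSegs 0 (PySem.Chars.strip raw.toList)).map PySem.Chars.strip).filterMap pvClean).map
          String.ofList) := by
  unfold split_php_args_py_alt
  have hfold := pvFoldB (PySem.Chars.strip raw.toList) 0 0 [-1]
  simp only [Nat.cast_zero] at hfold
  have hsl := pvSlices (PySem.Chars.strip raw.toList) (PySem.Chars.strip raw.toList) 0 0
    (by simp)
  simp only [Nat.cast_zero, zero_sub] at hsl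
  dsimp only
  rw [hfold]
  have hcomp : (fun lh : Int × Int =>
      PySem.Chars.strip (PySem.List.slice (PySem.Chars.strip raw.toList) (some (lh.1 + 1)) (some lh.2)))
      = PySem.Chars.strip ∘ (fun lh : Int × Int =>
        PySem.List.slice (PySem.Chars.strip raw.toList) (some (lh.1 + 1)) (some lh.2)) := rfl
  rw [hcomp, ← List.map_map]
  simp only [List.cons_append, List.nil_append, List.tail_cons] at hsl ⊢
  rw [hsl]

theorem pvA (raw : String) :
    split_php_args_py raw
      = ((((pvSegs 0 (PySem.Chars.strip raw.toList)).map PySem.Chars.strip).filterMap pvClean).map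
          String.ofList) := by
  unfold split_php_args_py
  by_cases hnil : PySem.Chars.strip raw.toList = []
  · rw [if_pos hnil, hnil]
    have hc : pvClean [] = none := by decide
    have hstrip : PySem.Chars.strip ([] : List Char) = [] := by decide
    simp [pvSegs, hc, hstrip]
  · rw [if_neg hnil]
    have hS : pvSegs 0 (PySem.Chars.strip raw.toList) ≠ [] := pvSegs_ne_nil _ _
    obtain ⟨h1, h2⟩ := pvFoldA (PySem.Chars.strip raw.toList) [] 0 []
    have hmod : (pvSegs 0 (PySem.Chars.strip raw.toList)).modifyHead (fun x => [] ++ x)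
        = pvSegs 0 (PySem.Chars.strip raw.toList) := by
      cases pvSegs 0 (PySem.Chars.strip raw.toList) <;> simp
    rw [hmod] at h1 h2
    have hgl : (pvSegs 0 (PySem.Chars.strip raw.toList)).getLastD []
        = (pvSegs 0 (PySem.Chars.strip raw.toList)).getLast hS := by
      rw [List.getLastD_eq_getLast?, List.getLast?_eq_getLast hS]
      rfl
    have hsplit : (pvSegs 0 (PySem.Chars.strip raw.toList)).map PySem.Chars.strip
        = ((pvSegs 0 (PySem.Chars.strip raw.toList)).dropLast).map PySem.Chars.strip
          ++ [PySem.Chars.strip ((pvSegs 0 (PySem.Chars.strip raw.toList)).getLast hS)] := by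
      conv_lhs => rw [← List.dropLast_append_getLast hS]
      simp
    dsimp only
    rw [pvCleanFold, List.nil_append, h1, h2, hgl, hsplit, List.filterMap_append]
    by_cases hlast : PySem.Chars.strip ((pvSegs 0 (PySem.Chars.strip raw.toList)).getLast hS) = []
    · rw [if_neg (by simp [hlast]), hlast]
      have hc : pvClean [] = none := by decide
      simp [hc]
    · rw [if_pos (by simpa using hlast), List.filterMap_append]
      simp

theorem pvMain (raw : String) : split_php_args_py raw = split_php_args_py_alt raw := by
  rw [pvA, pvAlt]

-- ===== VERDICT (by name: the statement is the Claim_ definition above) =====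
theorem split_php_args_py_spec : Claim_equal_split_php_args_py := by
  intro raw _
  show _ = _
  exact pvMain raw
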